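-- pv_equiv track=rewrite | github.com/gus-rautenberg/digital-image-processing | 1-exercicio/watershed_edge.py | distance_transform
-- ===== SOURCE A (Python) =====
-- def distance_transform(binary):
--     """
--     Calcula a distância Manhattan de cada pixel do foreground ao background.
--     Utiliza uma abordagem de dois passes.
--     """
--     height = len(binary)
--     width = len(binary[0])
--     max_val = width + height
--     dist = [[max_val if binary[i][j]==1 else 0 for j in range(width)] for i in range(height)]
--
--     # Passagem para frente
--     for i in range(height):
--         for j in range(width):
--             if dist[i][j] == 0:
--                 continue
--             if i > 0:
--                 dist[i][j] = min(dist[i][j], dist[i-1][j] + 1)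
--             if j > 0:
--                 dist[i][j] = min(dist[i][j], dist[i][j-1] + 1)
--     # Passagem para trás
--     for i in range(height-1, -1, -1):
--         for j in range(width-1, -1, -1):
--             if i < height-1:
--                 dist[i][j] = min(dist[i][j], dist[i+1][j] + 1)
--             if j < width-1:
--                 dist[i][j] = min(dist[i][j], dist[i][j+1] + 1)
--     return dist
-- ===== SOURCE B (Python) =====
-- def distance_transform(binary):
--     """Direct definition: per foreground pixel, min of max_val and the
--     Manhattan distances to all background pixels (background stays 0)."""
--     height = len(binary)
--     width = len(binary[0])
--     max_val = width + height
--     bg = [(k, l) for k in range(height) for l in range(width) if binary[k][l] != 1]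
--     result = []
--     for i in range(height):
--         row = []
--         for j in range(width):
--             if binary[i][j] == 1:
--                 best = max_val
--                 for (k, l) in bg:
--                     d = abs(i - k) + abs(j - l)
--                     if d < best:
--                         best = d
--                 row.append(best)
--             else:
--                 row.append(0)
--         result.append(row)
--     return result
-- ===== Notes on version B (the rewrite author's own statement) =====
-- stated objective: alternative
-- what changed: Replaces the in-place two-pass chamfer relaxation with a direct definition: collect all background cells once, then each foreground pixel takes the minimum of max_val and its Manhattan distances to those cells (background pixels are 0).
import Mathlib
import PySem

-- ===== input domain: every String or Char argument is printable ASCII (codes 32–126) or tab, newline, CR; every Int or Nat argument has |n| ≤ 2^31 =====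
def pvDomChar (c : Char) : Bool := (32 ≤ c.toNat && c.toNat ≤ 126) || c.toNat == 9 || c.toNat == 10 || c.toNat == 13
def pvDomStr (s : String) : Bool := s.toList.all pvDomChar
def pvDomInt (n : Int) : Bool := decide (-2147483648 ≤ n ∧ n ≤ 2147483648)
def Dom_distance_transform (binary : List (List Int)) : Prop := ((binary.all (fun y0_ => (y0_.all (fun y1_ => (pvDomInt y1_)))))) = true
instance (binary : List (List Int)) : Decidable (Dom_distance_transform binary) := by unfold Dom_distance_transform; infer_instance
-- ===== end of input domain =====

-- B replaces A's in-place two-pass chamfer relaxation by the direct definition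
-- (min of max_val and the Manhattan distances to every background cell); not faster, a
-- genuinely different algorithm of the same result.

-- B replaces A's in-place two-pass chamfer relaxation by the direct definition: the
-- minimum of max_val and the Manhattan distances to every background cell (an
-- alternative algorithm of the same result, not faster).

-- ===== PORT A =====
-- pixel read dist[i][j] / binary[i][j]; always in range where the ports evaluate it
def dtGet (g : List (List Int)) (i j : Nat) : Int := (g.getD i []).getD j 0

-- in-place assignment dist[i][j] = v
def dtSet (g : List (List Int)) (i j : Nat) (v : Int) : List (List Int) :=
  g.set i ((g.getD i []).set j v)

-- body of A's forward-pass loop for one cell (i, j)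
def dtFwdCell (g : List (List Int)) (i j : Nat) : List (List Int) :=
  if dtGet g i j = 0 then g
  else
    let g1 := if 0 < i then dtSet g i j (min (dtGet g i j) (dtGet g (i-1) j + 1)) else g
    if 0 < j then dtSet g1 i j (min (dtGet g1 i j) (dtGet g1 i (j-1) + 1)) else g1

-- body of A's backward-pass loop for one cell (i, j)
def dtBwdCell (height width : Nat) (g : List (List Int)) (i j : Nat) : List (List Int) :=
  let g1 := if i < height - 1 then dtSet g i j (min (dtGet g i j) (dtGet g (i+1) j + 1)) else g
  if j < width - 1 then dtSet g1 i j (min (dtGet g1 i j) (dtGet g1 i (j+1) + 1)) else g1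

def distance_transform (binary : List (List Int)) : List (List Int) :=
  let height := binary.length
  let width := (binary.headD []).length          -- len(binary[0]); raises on [], excluded by Pre_
  let maxVal : Int := (width : Int) + (height : Int)
  let dist0 : List (List Int) :=
    (List.range height).map (fun i =>
      (List.range width).map (fun j =>
        if (binary.getD i []).getD j 0 = 1 then maxVal else 0))
  let fwd := (List.range height).foldl
      (fun g i => (List.range width).foldl (fun g j => dtFwdCell g i j) g) dist0
  (List.range height).reverse.foldl
      (fun g i => (List.range width).reverse.foldl (fun g j => dtBwdCell height width g i j) g) fwd

-- ===== PORT B =====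
def distance_transform_alt (binary : List (List Int)) : List (List Int) :=
  let height := binary.length
  let width := (binary.headD []).length          -- len(binary[0]); raises on [], excluded by Pre_
  let maxVal : Int := (width : Int) + (height : Int)
  let bg : List (Nat × Nat) :=
    (List.range height).flatMap (fun k =>
      (List.range width).filterMap (fun l =>
        if (binary.getD k []).getD l 0 ≠ 1 then some (k, l) else none))
  (List.range height).map (fun i =>
    (List.range width).map (fun j =>
      if (binary.getD i []).getD j 0 = 1 then
        bg.foldl (fun best kl =>
          let d := |(i : Int) - (kl.1 : Int)| + |(j : Int) - (kl.2 : Int)|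
          if d < best then d else best) maxVal
      else 0))

-- ===== PRECONDITION & SPEC =====
-- Pre_ excludes exactly the inputs on which Python A raises IndexError: the empty list
-- (binary[0]) and ragged inputs where some row is shorter than the first row.
def Pre_distance_transform (binary : List (List Int)) : Prop :=
  binary ≠ [] ∧ ∀ row ∈ binary, (binary.headD []).length ≤ row.length
instance (binary : List (List Int)) : Decidable (Pre_distance_transform binary) := by
  unfold Pre_distance_transform; infer_instance
def pvWitness_distance_transform : List (List Int) := [[1, 0], [1, 1]]

def Spec_distance_transform (binary : List (List Int)) (out : List (List Int)) : Prop := out = distance_transform_alt binary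
instance (binary : List (List Int)) (out : List (List Int)) : Decidable (Spec_distance_transform binary out) := by unfold Spec_distance_transform; infer_instance

-- ===== CLAIM (what is proved, stated in full; the proofs are below) =====
def Claim_equal_distance_transform : Prop := ∀ (binary : List (List Int)), Dom_distance_transform binary → Pre_distance_transform binary → Spec_distance_transform binary (distance_transform binary)

-- ===== LEMMAS AND PROOFS =====
def canon (n m : Nat) (V : Nat → Nat → Int) : List (List Int) :=
  (List.range n).map (fun a => (List.range m).map (fun b => V a b))

lemma canon_get {n m : Nat} {V : Nat → Nat → Int} {a b : Nat} (ha : a < n) (hb : b < m) :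
    dtGet (canon n m V) a b = V a b := by
  simp [canon, dtGet, List.getD_eq_getElem?_getD, ha, hb]

lemma canon_congr {n m : Nat} {V W : Nat → Nat → Int}
    (h : ∀ a < n, ∀ b < m, V a b = W a b) : canon n m V = canon n m W := by
  unfold canon
  apply List.map_congr_left
  intro a ha
  apply List.map_congr_left
  intro b hb
  exact h a (List.mem_range.mp ha) b (List.mem_range.mp hb)

lemma canon_set {n m : Nat} (V : Nat → Nat → Int) {i j : Nat} (hi : i < n) (hj : j < m) (v : Int) :
    dtSet (canon n m V) i j v
      = canon n m (fun a b => if a = i ∧ b = j then v else V a b) := by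
  unfold canon dtSet
  apply List.ext_getElem
  · simp
  intro a h1 h2
  simp only [List.getElem_set, List.getD_eq_getElem?_getD, List.length_set] at *
  simp at h1
  by_cases hai : i = a
  · subst hai
    simp [List.getElem?_map, List.getElem_map, hi, h1]
    apply List.ext_getElem
    · simp
    intro b hb1 hb2
    simp at hb1
    simp [List.getElem_set, List.getElem_map, hb1]
    by_cases hbj : j = b
    · subst hbj; simp
    · simp [hbj, (Ne.symm hbj : b ≠ j)]
  · simp [hai, List.getElem_map, h1]
    try (intro b hb h; exact absurd h (Ne.symm hai))


def fwdF (I : Nat → Nat → Int) : Nat → Nat → Int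
  | i, j =>
    if I i j = 0 then 0
    else
      let a := if _h : 0 < i then min (I i j) (fwdF I (i-1) j + 1) else I i j
      if _h : 0 < j then min a (fwdF I i (j-1) + 1) else a
  termination_by i j => i + j
  decreasing_by all_goals omega

def mixF (I : Nat → Nat → Int) (i j : Nat) : Nat → Nat → Int :=
  fun a b => if a < i ∨ (a = i ∧ b < j) then fwdF I a b else I a b

lemma mixF_cur (I : Nat → Nat → Int) (i j : Nat) : mixF I i j i j = I i j := by
  simp [mixF]

lemma fwdCell_canon {n m : Nat} (I : Nat → Nat → Int) {i j : Nat} (hi : i < n) (hj : j < m) :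
    dtFwdCell (canon n m (mixF I i j)) i j = canon n m (mixF I i (j+1)) := by
  have hcur : dtGet (canon n m (mixF I i j)) i j = I i j := by
    rw [canon_get hi hj, mixF_cur]
  have hstep : ∀ a < n, ∀ b < m,
      (if a = i ∧ b = j then fwdF I i j else mixF I i j a b) = mixF I i (j+1) a b := by
    intro a ha b hb
    by_cases hab : a = i ∧ b = j
    · obtain ⟨rfl, rfl⟩ := hab
      simp [mixF]
    · rw [if_neg hab]
      have hiff : (a < i ∨ (a = i ∧ b < j)) ↔ (a < i ∨ (a = i ∧ b < j + 1)) := by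
        constructor <;> intro h <;> omega
      unfold mixF
      by_cases hd : a < i ∨ (a = i ∧ b < j)
      · rw [if_pos hd, if_pos (hiff.mp hd)]
      · rw [if_neg hd, if_neg (fun h => hd (hiff.mpr h))]
  unfold dtFwdCell
  rw [hcur]
  by_cases h0 : I i j = 0
  · rw [if_pos h0]
    refine (canon_congr ?_)
    intro a ha b hb
    rw [← hstep a ha b hb]
    by_cases hab : a = i ∧ b = j
    · obtain ⟨rfl, rfl⟩ := hab
      rw [if_pos ⟨rfl, rfl⟩, fwdF]
      simp [mixF, h0]
    · rw [if_neg hab]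
  · rw [if_neg h0]
    have hfwd : fwdF I i j =
        (if 0 < j then
          min (if 0 < i then min (I i j) (fwdF I (i-1) j + 1) else I i j) (fwdF I i (j-1) + 1)
        else (if 0 < i then min (I i j) (fwdF I (i-1) j + 1) else I i j)) := by
      rw [fwdF]
      rw [if_neg h0]
      by_cases hip : 0 < i <;> by_cases hjp : 0 < j <;> simp [hip, hjp]
    by_cases hip : 0 < i <;> by_cases hjp : 0 < j
    · simp only [hip, hjp, if_true]
      rw [canon_get (by omega : i - 1 < n) hj]
      rw [(by simp [mixF]; omega : mixF I i j (i-1) j = fwdF I (i-1) j)]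
      rw [canon_set _ hi hj]
      rw [canon_get hi hj, canon_get hi (by omega : j - 1 < m)]
      rw [if_pos ⟨rfl, rfl⟩, if_neg (by omega : ¬ (i = i ∧ j - 1 = j))]
      rw [(by simp [mixF]; omega : mixF I i j i (j-1) = fwdF I i (j-1))]
      rw [canon_set _ hi hj]
      refine canon_congr ?_
      intro a ha b hb
      rw [← hstep a ha b hb]
      by_cases hab : a = i ∧ b = j
      · obtain ⟨rfl, rfl⟩ := hab
        rw [if_pos ⟨rfl, rfl⟩, if_pos ⟨rfl, rfl⟩, hfwd]
        simp [hip, hjp]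
      · rw [if_neg hab, if_neg hab, if_neg hab]
    · simp only [hip, hjp, if_true, if_false]
      rw [canon_get (by omega : i - 1 < n) hj]
      rw [(by simp [mixF]; omega : mixF I i j (i-1) j = fwdF I (i-1) j)]
      rw [canon_set _ hi hj]
      refine canon_congr ?_
      intro a ha b hb
      rw [← hstep a ha b hb]
      by_cases hab : a = i ∧ b = j
      · obtain ⟨rfl, rfl⟩ := hab
        rw [if_pos ⟨rfl, rfl⟩, if_pos ⟨rfl, rfl⟩, hfwd]
        simp [hip, hjp]
      · rw [if_neg hab, if_neg hab]
    · simp only [hip, hjp, if_true, if_false]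
      rw [hcur, canon_get hi (by omega : j - 1 < m)]
      rw [(by simp [mixF]; omega : mixF I i j i (j-1) = fwdF I i (j-1))]
      rw [canon_set _ hi hj]
      refine canon_congr ?_
      intro a ha b hb
      rw [← hstep a ha b hb]
      by_cases hab : a = i ∧ b = j
      · obtain ⟨rfl, rfl⟩ := hab
        rw [if_pos ⟨rfl, rfl⟩, if_pos ⟨rfl, rfl⟩, hfwd]
        simp [hip, hjp]
      · rw [if_neg hab, if_neg hab]
    · simp only [hip, hjp, if_false]
      refine canon_congr ?_
      intro a ha b hb
      rw [← hstep a ha b hb]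
      by_cases hab : a = i ∧ b = j
      · obtain ⟨rfl, rfl⟩ := hab
        rw [if_pos ⟨rfl, rfl⟩, hfwd]
        simp [hip, hjp, mixF]
      · rw [if_neg hab]

lemma fwd_inner {n m : Nat} (I : Nat → Nat → Int) {i : Nat} (hi : i < n) :
    ∀ j, j ≤ m →
    (List.range j).foldl (fun g j' => dtFwdCell g i j') (canon n m (mixF I i 0))
      = canon n m (mixF I i j) := by
  intro j
  induction j with
  | zero => intro _; simp
  | succ j ih =>
    intro hj
    rw [List.range_succ, List.foldl_append, ih (by omega), List.foldl_cons, List.foldl_nil]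
    exact fwdCell_canon I hi (by omega)

lemma fwd_outer {n m : Nat} (I : Nat → Nat → Int) :
    ∀ i, i ≤ n →
    (List.range i).foldl (fun g i' => (List.range m).foldl (fun g j => dtFwdCell g i' j) g) (canon n m I)
      = canon n m (mixF I i 0) := by
  intro i
  induction i with
  | zero =>
    intro _
    simp only [List.range_zero, List.foldl_nil]
    exact canon_congr (by intro a _ b _; simp [mixF])
  | succ i ih =>
    intro hi
    rw [List.range_succ, List.foldl_append, ih (by omega), List.foldl_cons, List.foldl_nil]
    rw [fwd_inner I (by omega) m (le_refl m)]
    exact canon_congr (by intro a ha b hb; simp [mixF]; omega)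


def bwdF (n m : Nat) (J : Nat → Nat → Int) : Nat → Nat → Int
  | i, j =>
    let a := if _h : i < n - 1 then min (J i j) (bwdF n m J (i+1) j + 1) else J i j
    if _h : j < m - 1 then min a (bwdF n m J i (j+1) + 1) else a
  termination_by i j => (n - i) + (m - j)
  decreasing_by all_goals omega

-- processed cells of the backward pass when about to process (row k, col l): rows > k, and in row k the columns ≥ l
def mixB (n m : Nat) (J : Nat → Nat → Int) (k l : Nat) : Nat → Nat → Int :=
  fun a b => if k < a ∨ (a = k ∧ l ≤ b) then bwdF n m J a b else J a b

lemma bwdCell_canon {n m : Nat} (J : Nat → Nat → Int) {k l : Nat} (hk : k < n) (hl : l < m) :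
    dtBwdCell n m (canon n m (mixB n m J k (l+1))) k l = canon n m (mixB n m J k l) := by
  have hcur : dtGet (canon n m (mixB n m J k (l+1))) k l = J k l := by
    rw [canon_get hk hl]
    simp [mixB]
  have hstep : ∀ a < n, ∀ b < m,
      (if a = k ∧ b = l then bwdF n m J k l else mixB n m J k (l+1) a b) = mixB n m J k l a b := by
    intro a ha b hb
    by_cases hab : a = k ∧ b = l
    · obtain ⟨rfl, rfl⟩ := hab
      simp [mixB]
    · simp [hab]
      have hiff : (k < a ∨ (a = k ∧ l + 1 ≤ b)) ↔ (k < a ∨ (a = k ∧ l ≤ b)) := by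
        constructor <;> intro h <;> omega
      unfold mixB
      by_cases hd : k < a ∨ (a = k ∧ l + 1 ≤ b)
      · rw [if_pos hd, if_pos (hiff.mp hd)]
      · rw [if_neg hd, if_neg (fun h => hd (hiff.mpr h))]
  have hbwd : bwdF n m J k l =
      (if l < m - 1 then
        min (if k < n - 1 then min (J k l) (bwdF n m J (k+1) l + 1) else J k l) (bwdF n m J k (l+1) + 1)
      else (if k < n - 1 then min (J k l) (bwdF n m J (k+1) l + 1) else J k l)) := by
    rw [bwdF]
    by_cases hkp : k < n - 1 <;> by_cases hlp : l < m - 1 <;> simp [hkp, hlp]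
  unfold dtBwdCell
  rw [hcur]
  by_cases hkp : k < n - 1 <;> by_cases hlp : l < m - 1
  · simp only [hkp, hlp, if_true]
    rw [canon_get (by omega : k + 1 < n) hl]
    rw [(by simp [mixB] : mixB n m J k (l+1) (k+1) l = bwdF n m J (k+1) l)]
    rw [canon_set _ hk hl]
    rw [canon_get hk hl, canon_get hk (by omega : l + 1 < m)]
    rw [if_pos ⟨rfl, rfl⟩, if_neg (by omega : ¬ (k = k ∧ l + 1 = l))]
    rw [(by simp [mixB] : mixB n m J k (l+1) k (l+1) = bwdF n m J k (l+1))]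
    rw [canon_set _ hk hl]
    refine canon_congr ?_
    intro a ha b hb
    rw [← hstep a ha b hb]
    by_cases hab : a = k ∧ b = l
    · obtain ⟨rfl, rfl⟩ := hab
      rw [if_pos ⟨rfl, rfl⟩, if_pos ⟨rfl, rfl⟩, hbwd]
      simp [hkp, hlp, mixB]
    · simp [hab]
  · simp only [hkp, hlp, if_true, if_false]
    rw [canon_get (by omega : k + 1 < n) hl]
    rw [(by simp [mixB] : mixB n m J k (l+1) (k+1) l = bwdF n m J (k+1) l)]
    rw [canon_set _ hk hl]
    refine canon_congr ?_
    intro a ha b hb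
    rw [← hstep a ha b hb]
    by_cases hab : a = k ∧ b = l
    · obtain ⟨rfl, rfl⟩ := hab
      rw [if_pos ⟨rfl, rfl⟩, if_pos ⟨rfl, rfl⟩, hbwd]
      simp [hkp, hlp, mixB]
    · simp [hab]
  · simp only [hkp, hlp, if_true, if_false]
    rw [hcur, canon_get hk (by omega : l + 1 < m)]
    rw [(by simp [mixB] : mixB n m J k (l+1) k (l+1) = bwdF n m J k (l+1))]
    rw [canon_set _ hk hl]
    refine canon_congr ?_
    intro a ha b hb
    rw [← hstep a ha b hb]
    by_cases hab : a = k ∧ b = l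
    · obtain ⟨rfl, rfl⟩ := hab
      rw [if_pos ⟨rfl, rfl⟩, hbwd]
      simp [hkp, hlp, mixB]
    · simp [hab]
  · simp only [hkp, hlp, if_false]
    refine canon_congr ?_
    intro a ha b hb
    rw [← hstep a ha b hb]
    by_cases hab : a = k ∧ b = l
    · obtain ⟨rfl, rfl⟩ := hab
      rw [if_pos ⟨rfl, rfl⟩, hbwd]
      simp [hkp, hlp, mixB]
    · simp [hab]

lemma bwd_inner {n m : Nat} (J : Nat → Nat → Int) {k : Nat} (hk : k < n) :
    ∀ l, l ≤ m →
    ((List.range l).reverse).foldl (fun g l' => dtBwdCell n m g k l') (canon n m (mixB n m J k l))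
      = canon n m (mixB n m J k 0) := by
  intro l
  induction l with
  | zero => intro _; simp
  | succ l ih =>
    intro hl
    rw [List.range_succ, List.reverse_append, List.reverse_singleton, List.singleton_append,
        List.foldl_cons]
    rw [bwdCell_canon J hk (by omega)]
    exact ih (by omega)

lemma bwd_outer {n m : Nat} (J : Nat → Nat → Int) :
    ∀ k, k ≤ n →
    ((List.range k).reverse).foldl
        (fun g k' => ((List.range m).reverse).foldl (fun g l => dtBwdCell n m g k' l) g)
        (canon n m (mixB n m J k 0))
      = canon n m (fun a b => bwdF n m J a b) := by
  intro k
  induction k with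
  | zero =>
    intro _
    simp only [List.range_zero, List.reverse_nil, List.foldl_nil]
    exact canon_congr (by intro a ha b hb; unfold mixB; rw [if_pos (by omega)])
  | succ k ih =>
    intro hk
    rw [List.range_succ, List.reverse_append, List.reverse_singleton, List.singleton_append,
        List.foldl_cons]
    have h1 : canon n m (mixB n m J (k+1) 0) = canon n m (mixB n m J k m) := by
      refine canon_congr ?_
      intro a ha b hb
      unfold mixB
      by_cases hd : k + 1 < a ∨ (a = k + 1 ∧ 0 ≤ b)
      · rw [if_pos hd, if_pos (by omega : k < a ∨ (a = k ∧ m ≤ b))]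
      · rw [if_neg hd, if_neg (by omega : ¬ (k < a ∨ (a = k ∧ m ≤ b)))]
    rw [h1, bwd_inner J (by omega : k < n) m (le_refl m)]
    exact ih (by omega)

lemma fwd_nonneg (I : Nat → Nat → Int) (hI : ∀ a b, 0 ≤ I a b) :
    ∀ N i j, i + j ≤ N → 0 ≤ fwdF I i j := by
  intro N
  induction N with
  | zero =>
    intro i j h
    rw [fwdF]
    have hi : ¬ 0 < i := by omega
    have hj : ¬ 0 < j := by omega
    split_ifs <;> simp_all <;> exact hI i j
  | succ N ih =>
    intro i j h
    rw [fwdF]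
    split_ifs with h0 hi hj hj
    · omega
    · refine le_min (le_min (hI i j) ?_) ?_
      · have := ih (i-1) j (by omega); omega
      · have := ih i (j-1) (by omega); omega
    · refine le_min (hI i j) ?_
      have := ih (i-1) j (by omega); omega
    · refine le_min (hI i j) ?_
      have := ih i (j-1) (by omega); omega
    · exact hI i j

lemma fwd_le_self (I : Nat → Nat → Int) (hI : ∀ a b, 0 ≤ I a b) (i j : Nat) :
    fwdF I i j ≤ I i j := by
  rw [fwdF]
  split_ifs with h0 hi hj hj
  · omega
  · exact le_trans (min_le_left _ _) (min_le_left _ _)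
  · exact min_le_left _ _
  · exact le_trans (min_le_left _ _) (le_refl _)
  · exact le_refl _

lemma fwd_le (I : Nat → Nat → Int) (hI : ∀ a b, 0 ≤ I a b) :
    ∀ N i j p q, i + j ≤ N → p ≤ i → q ≤ j →
      fwdF I i j ≤ I p q + ((i:Int) - (p:Int)) + ((j:Int) - (q:Int)) := by
  intro N
  induction N with
  | zero =>
    intro i j p q h hp hq
    have : p = i ∧ q = j := by omega
    obtain ⟨rfl, rfl⟩ := this
    have := fwd_le_self I hI p q
    omega
  | succ N ih =>
    intro i j p q h hp hq
    rcases Nat.eq_or_lt_of_le hp with heq | hpi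
    · subst heq
      rcases Nat.eq_or_lt_of_le hq with heq2 | hqj
      · subst heq2
        have := fwd_le_self I hI p q
        omega
      · -- q < j, so 0 < j; use left neighbour
        have hj : 0 < j := by omega
        have hrec := ih p (j-1) p q (by omega) (le_refl p) (by omega)
        have hle : fwdF I p j ≤ fwdF I p (j-1) + 1 := by
          rw [fwdF]
          split_ifs with h0 hi
          · have := fwd_nonneg I hI N p (j-1) (by omega); omega
          · exact le_trans (min_le_right _ _) (le_refl _)
          · exact min_le_right _ _
        have hc : ((j-1:Nat):Int) = (j:Int) - 1 := by omega
        rw [hc] at hrec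
        omega
    · -- p < i, so 0 < i; use up neighbour
      have hi : 0 < i := by omega
      have hrec := ih (i-1) j p q (by omega) (by omega) hq
      have hle : fwdF I i j ≤ fwdF I (i-1) j + 1 := by
        rw [fwdF]
        split_ifs with h0 hj
        · have := fwd_nonneg I hI N (i-1) j (by omega); omega
        · exact le_trans (min_le_left _ _) (min_le_right _ _)
        · exact min_le_right _ _
      have hc : ((i-1:Nat):Int) = (i:Int) - 1 := by omega
      rw [hc] at hrec
      omega

lemma fwd_attain (I : Nat → Nat → Int) :
    ∀ N i j, i + j ≤ N →
      ∃ p q, p ≤ i ∧ q ≤ j ∧ fwdF I i j = I p q + ((i:Int) - (p:Int)) + ((j:Int) - (q:Int)) := by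
  intro N
  induction N with
  | zero =>
    intro i j h
    refine ⟨i, j, le_refl _, le_refl _, ?_⟩
    rw [fwdF]
    have hi : ¬ 0 < i := by omega
    have hj : ¬ 0 < j := by omega
    split_ifs with h0
    · simp [h0]
    · simp
  | succ N ih =>
    intro i j h
    by_cases h0 : I i j = 0
    · refine ⟨i, j, le_refl _, le_refl _, ?_⟩
      rw [fwdF]
      simp [h0]
    · have hval : fwdF I i j = (if 0 < j then
          min (if 0 < i then min (I i j) (fwdF I (i-1) j + 1) else I i j) (fwdF I i (j-1) + 1)
        else (if 0 < i then min (I i j) (fwdF I (i-1) j + 1) else I i j)) := by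
        rw [fwdF]
        rw [if_neg h0]
        by_cases hi : 0 < i <;> by_cases hj : 0 < j <;> simp [hi, hj]
      have hup : 0 < i → fwdF I i j = fwdF I (i-1) j + 1 →
          ∃ p q, p ≤ i ∧ q ≤ j ∧ fwdF I i j = I p q + ((i:Int) - p) + ((j:Int) - q) := by
        intro hi he
        obtain ⟨p, q, hp, hq, hv⟩ := ih (i-1) j (by omega)
        refine ⟨p, q, by omega, hq, ?_⟩
        rw [he, hv]
        have hc : ((i-1:Nat):Int) = (i:Int) - 1 := by omega
        rw [hc]; ring
      have hleft : 0 < j → fwdF I i j = fwdF I i (j-1) + 1 →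
          ∃ p q, p ≤ i ∧ q ≤ j ∧ fwdF I i j = I p q + ((i:Int) - p) + ((j:Int) - q) := by
        intro hj he
        obtain ⟨p, q, hp, hq, hv⟩ := ih i (j-1) (by omega)
        refine ⟨p, q, hp, by omega, ?_⟩
        rw [he, hv]
        have hc : ((j-1:Nat):Int) = (j:Int) - 1 := by omega
        rw [hc]; ring
      have hself : fwdF I i j = I i j →
          ∃ p q, p ≤ i ∧ q ≤ j ∧ fwdF I i j = I p q + ((i:Int) - p) + ((j:Int) - q) := by
        intro he
        exact ⟨i, j, le_refl _, le_refl _, by rw [he]; ring⟩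
      by_cases hi : 0 < i <;> by_cases hj : 0 < j
      · rw [if_pos hj, if_pos hi] at hval
        rcases min_cases (min (I i j) (fwdF I (i-1) j + 1)) (fwdF I i (j-1) + 1) with ⟨he, _⟩ | ⟨he, _⟩
        · rw [he] at hval
          rcases min_cases (I i j) (fwdF I (i-1) j + 1) with ⟨he2, _⟩ | ⟨he2, _⟩
          · exact hself (by rw [hval, he2])
          · exact hup hi (by rw [hval, he2])
        · exact hleft hj (by rw [hval, he])
      · rw [if_neg hj, if_pos hi] at hval
        rcases min_cases (I i j) (fwdF I (i-1) j + 1) with ⟨he2, _⟩ | ⟨he2, _⟩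
        · exact hself (by rw [hval, he2])
        · exact hup hi (by rw [hval, he2])
      · rw [if_pos hj, if_neg hi] at hval
        rcases min_cases (I i j) (fwdF I i (j-1) + 1) with ⟨he2, _⟩ | ⟨he2, _⟩
        · exact hself (by rw [hval, he2])
        · exact hleft hj (by rw [hval, he2])
      · rw [if_neg hj, if_neg hi] at hval
        exact hself hval

lemma bwd_nonneg (n m : Nat) (J : Nat → Nat → Int) (hJ : ∀ a b, 0 ≤ J a b) :
    ∀ N i j, (n - i) + (m - j) ≤ N → 0 ≤ bwdF n m J i j := by
  intro N
  induction N with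
  | zero =>
    intro i j h
    rw [bwdF]
    have hi : ¬ i < n - 1 := by omega
    have hj : ¬ j < m - 1 := by omega
    simp only [hi, hj, dif_neg, not_false_iff]
    exact hJ i j
  | succ N ih =>
    intro i j h
    rw [bwdF]
    by_cases hi : i < n - 1 <;> by_cases hj : j < m - 1 <;>
      simp only [hi, hj, dif_pos, dif_neg, not_false_iff]
    · refine le_min (le_min (hJ i j) ?_) ?_
      · have := ih (i+1) j (by omega); omega
      · have := ih i (j+1) (by omega); omega
    · exact le_min (hJ i j) (by have := ih (i+1) j (by omega); omega)
    · exact le_min (hJ i j) (by have := ih i (j+1) (by omega); omega)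
    · exact hJ i j

lemma bwd_le_self (n m : Nat) (J : Nat → Nat → Int) (i j : Nat) :
    bwdF n m J i j ≤ J i j := by
  rw [bwdF]
  split_ifs with hi hj hj
  · exact le_trans (min_le_left _ _) (min_le_left _ _)
  · exact min_le_left _ _
  · exact min_le_left _ _
  · exact le_refl _

lemma bwd_le (n m : Nat) (J : Nat → Nat → Int) :
    ∀ N i j p q, (n - i) + (m - j) ≤ N → i ≤ p → p < n → j ≤ q → q < m →
      bwdF n m J i j ≤ J p q + ((p:Int) - (i:Int)) + ((q:Int) - (j:Int)) := by
  intro N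
  induction N with
  | zero =>
    intro i j p q h hip hpn hjq hqm
    have : p = i ∧ q = j := by omega
    obtain ⟨rfl, rfl⟩ := this
    have := bwd_le_self n m J p q
    omega
  | succ N ih =>
    intro i j p q h hip hpn hjq hqm
    rcases Nat.eq_or_lt_of_le hip with heq | hpi
    · subst heq
      rcases Nat.eq_or_lt_of_le hjq with heq2 | hqj
      · subst heq2
        have := bwd_le_self n m J i j
        omega
      · -- j < q, so j < m - 1
        have hj : j < m - 1 := by omega
        have hrec := ih i (j+1) i q (by omega) (le_refl i) hpn (by omega) hqm
        have hle : bwdF n m J i j ≤ bwdF n m J i (j+1) + 1 := by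
          rw [bwdF]
          split_ifs with hi
          · exact le_trans (min_le_right _ _) (le_refl _)
          · exact min_le_right _ _
        push_cast at hrec ⊢
        omega
    · -- i < p, so i < n - 1
      have hi : i < n - 1 := by omega
      have hrec := ih (i+1) j p q (by omega) (by omega) hpn hjq hqm
      have hle : bwdF n m J i j ≤ bwdF n m J (i+1) j + 1 := by
        rw [bwdF]
        split_ifs with hj
        · exact le_trans (min_le_left _ _) (min_le_right _ _)
        · exact min_le_right _ _
      push_cast at hrec ⊢
      omega

lemma bwd_attain (n m : Nat) (J : Nat → Nat → Int) :
    ∀ N i j, (n - i) + (m - j) ≤ N → i < n → j < m →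
      ∃ p q, i ≤ p ∧ p < n ∧ j ≤ q ∧ q < m ∧
        bwdF n m J i j = J p q + ((p:Int) - (i:Int)) + ((q:Int) - (j:Int)) := by
  intro N
  induction N with
  | zero => intro i j h hi hj; omega
  | succ N ih =>
    intro i j h hi hj
    have hval : bwdF n m J i j = (if j < m - 1 then
        min (if i < n - 1 then min (J i j) (bwdF n m J (i+1) j + 1) else J i j) (bwdF n m J i (j+1) + 1)
      else (if i < n - 1 then min (J i j) (bwdF n m J (i+1) j + 1) else J i j)) := by
      rw [bwdF]
      by_cases hip : i < n - 1 <;> by_cases hjp : j < m - 1 <;> simp [hip, hjp]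
    have hself : bwdF n m J i j = J i j →
        ∃ p q, i ≤ p ∧ p < n ∧ j ≤ q ∧ q < m ∧
          bwdF n m J i j = J p q + ((p:Int) - i) + ((q:Int) - j) := by
      intro he
      exact ⟨i, j, le_refl _, hi, le_refl _, hj, by rw [he]; ring⟩
    have hdown : i < n - 1 → bwdF n m J i j = bwdF n m J (i+1) j + 1 →
        ∃ p q, i ≤ p ∧ p < n ∧ j ≤ q ∧ q < m ∧
          bwdF n m J i j = J p q + ((p:Int) - i) + ((q:Int) - j) := by
      intro hip he
      have hfuel : (n - (i+1)) + (m - j) ≤ N := by clear hval hself he; omega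
      have hin : i + 1 < n := by omega
      obtain ⟨p, q, h1, h2, h3, h4, hv⟩ := ih (i+1) j hfuel hin hj
      refine ⟨p, q, le_trans (Nat.le_succ i) h1, h2, h3, h4, ?_⟩
      rw [he, hv]
      push_cast
      ring
    have hright : j < m - 1 → bwdF n m J i j = bwdF n m J i (j+1) + 1 →
        ∃ p q, i ≤ p ∧ p < n ∧ j ≤ q ∧ q < m ∧
          bwdF n m J i j = J p q + ((p:Int) - i) + ((q:Int) - j) := by
      intro hjp he
      have hfuel : (n - i) + (m - (j+1)) ≤ N := by clear hval hself hdown he; omega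
      have hjm : j + 1 < m := by omega
      obtain ⟨p, q, h1, h2, h3, h4, hv⟩ := ih i (j+1) hfuel hi hjm
      refine ⟨p, q, h1, h2, le_trans (Nat.le_succ j) h3, h4, ?_⟩
      rw [he, hv]
      push_cast
      ring
    by_cases hip : i < n - 1 <;> by_cases hjp : j < m - 1
    · rw [if_pos hjp, if_pos hip] at hval
      rcases min_cases (min (J i j) (bwdF n m J (i+1) j + 1)) (bwdF n m J i (j+1) + 1) with ⟨he, _⟩ | ⟨he, _⟩
      · rw [he] at hval
        rcases min_cases (J i j) (bwdF n m J (i+1) j + 1) with ⟨he2, _⟩ | ⟨he2, _⟩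
        · exact hself (by rw [hval, he2])
        · exact hdown hip (by rw [hval, he2])
      · exact hright hjp (by rw [hval, he])
    · rw [if_neg hjp, if_pos hip] at hval
      rcases min_cases (J i j) (bwdF n m J (i+1) j + 1) with ⟨he2, _⟩ | ⟨he2, _⟩
      · exact hself (by rw [hval, he2])
      · exact hdown hip (by rw [hval, he2])
    · rw [if_pos hjp, if_neg hip] at hval
      rcases min_cases (J i j) (bwdF n m J i (j+1) + 1) with ⟨he2, _⟩ | ⟨he2, _⟩
      · exact hself (by rw [hval, he2])
      · exact hright hjp (by rw [hval, he2])
    · rw [if_neg hjp, if_neg hip] at hval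
      exact hself hval

lemma foldl_min_eq (L : List Int) : ∀ (a x : Int), x ≤ a → (∀ d ∈ L, x ≤ d) →
    (a ≤ x ∨ ∃ d ∈ L, d ≤ x) →
    L.foldl (fun best d => if d < best then d else best) a = x := by
  induction L with
  | nil =>
    intro a x h1 _ h3
    rcases h3 with h | ⟨d, hd, _⟩
    · exact le_antisymm h h1
    · simp at hd
  | cons d L ih =>
    intro a x h1 h2 h3
    simp only [List.foldl_cons]
    have hstep : (if d < a then d else a) = min a d := by
      rw [min_def]; split_ifs <;> omega
    rw [hstep]
    apply ih
    · exact le_min h1 (h2 d (by simp))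
    · intro e he; exact h2 e (by simp [he])
    · rcases h3 with h | ⟨e, he, hle⟩
      · exact Or.inl (le_trans (min_le_left a d) h)
      · rcases List.mem_cons.mp he with rfl | he2
        · exact Or.inl (le_trans (min_le_right a e) hle)
        · exact Or.inr ⟨e, he2, hle⟩

lemma mem_bgList (n m : Nat) (c : Nat → Nat → Int) (x : Nat × Nat) :
    x ∈ (List.range n).flatMap (fun k =>
        (List.range m).filterMap (fun l => if c k l ≠ 1 then some (k, l) else none))
      ↔ x.1 < n ∧ x.2 < m ∧ c x.1 x.2 ≠ 1 := by
  obtain ⟨p, q⟩ := x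
  simp only [List.mem_flatMap, List.mem_filterMap, List.mem_range]
  constructor
  · rintro ⟨k, hk, l, hl, hif⟩
    by_cases hc : c k l ≠ 1
    · rw [if_pos hc] at hif
      have h := Option.some_inj.mp hif
      rw [Prod.mk.injEq] at h
      obtain ⟨rfl, rfl⟩ := h
      exact ⟨hk, hl, hc⟩
    · rw [if_neg hc] at hif; cases hif
  · rintro ⟨hp, hq, hc⟩
    exact ⟨p, hp, q, hq, by rw [if_pos hc]⟩

lemma abs_as_max (i p : Nat) :
    |(i:Int) - (p:Int)| = ((max i p : Nat):Int) - ((min i p : Nat):Int) := by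
  rcases le_total i p with h | h
  · rw [abs_of_nonpos (by push_cast; omega)]
    push_cast [Nat.max_eq_right h, Nat.min_eq_left h]
    ring
  · rw [abs_of_nonneg (by push_cast; omega)]
    push_cast [Nat.max_eq_left h, Nat.min_eq_right h]
    ring

lemma cell_eq (n m : Nat) (c : Nat → Nat → Int) {i j : Nat} (hi : i < n) (hj : j < m) :
    bwdF n m (fwdF (fun a b => if c a b = 1 then ((m:Int) + (n:Int)) else 0)) i j
      = (if c i j = 1 then
          ((List.range n).flatMap (fun k =>
            (List.range m).filterMap (fun l => if c k l ≠ 1 then some (k, l) else none))).foldl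
            (fun best kl =>
              if |(i:Int) - (kl.1:Int)| + |(j:Int) - (kl.2:Int)| < best then
                |(i:Int) - (kl.1:Int)| + |(j:Int) - (kl.2:Int)| else best) ((m:Int) + (n:Int))
        else 0) := by
  set M : Int := (m:Int) + (n:Int) with hM
  set I : Nat → Nat → Int := fun a b => if c a b = 1 then M else 0 with hI
  have hInn : ∀ a b, 0 ≤ I a b := by
    intro a b; rw [hI]; dsimp only; split_ifs
    · positivity
    · exact le_refl 0
  have hJnn : ∀ a b, 0 ≤ fwdF I a b := fun a b => fwd_nonneg I hInn (a+b) a b (le_refl _)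
  by_cases hc : c i j = 1
  · rw [if_pos hc]
    rw [← List.foldl_map (f := fun kl : Nat × Nat => |(i:Int) - (kl.1:Int)| + |(j:Int) - (kl.2:Int)|)
        (g := fun best d => if d < best then d else best)]
    refine (foldl_min_eq _ _ _ ?_ ?_ ?_).symm
    · -- x ≤ M
      have h1 := bwd_le_self n m (fwdF I) i j
      have h2 := fwd_le_self I hInn i j
      have h3 : I i j = M := by rw [hI]; simp [hc]
      omega
    · -- x ≤ every background distance
      intro d hd
      obtain ⟨⟨p, q⟩, hpq, rfl⟩ := List.mem_map.mp hd
      obtain ⟨hp, hq, hcpq⟩ := (mem_bgList n m c _).mp hpq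
      have hk : max i p < n := by omega
      have hl : max j q < m := by omega
      have h1 := bwd_le n m (fwdF I) ((n - i) + (m - j)) i j (max i p) (max j q)
        (le_refl _) (le_max_left _ _) hk (le_max_left _ _) hl
      have h2 := fwd_le I hInn (max i p + max j q) (max i p) (max j q) p q
        (le_refl _) (le_max_right _ _) (le_max_right _ _)
      have h3 : I p q = 0 := by rw [hI]; simp [hcpq]
      rw [h3] at h2
      rw [abs_as_max i p, abs_as_max j q]
      have e1 : ((max i p : Nat):Int) ≥ (i:Int) := by push_cast; omega
      have e2 : ((min i p : Nat):Int) ≤ (p:Int) := by push_cast; omega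
      have e3 : (min i p : Nat) = i + p - max i p := by omega
      have e4 : (min j q : Nat) = j + q - max j q := by omega
      have e5 : ((min i p : Nat):Int) = (i:Int) + (p:Int) - ((max i p : Nat):Int) := by
        rw [e3]; push_cast; omega
      have e6 : ((min j q : Nat):Int) = (j:Int) + (q:Int) - ((max j q : Nat):Int) := by
        rw [e4]; push_cast; omega
      rw [e5, e6]
      omega
    · -- x is attained: either M or some background distance
      obtain ⟨p, q, h1, h2, h3, h4, hv⟩ :=
        bwd_attain n m (fwdF I) ((n - i) + (m - j)) i j (le_refl _) hi hj
      obtain ⟨p', q', hp', hq', hv'⟩ := fwd_attain I (p + q) p q (le_refl _)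
      by_cases hc' : c p' q' = 1
      · left
        have hIp : I p' q' = M := by rw [hI]; simp [hc']
        rw [hIp] at hv'
        rw [hv', ] at hv
        have c1 : ((p':Nat):Int) ≤ (p:Int) := by push_cast; omega
        have c2 : ((q':Nat):Int) ≤ (q:Int) := by push_cast; omega
        have c3 : (i:Int) ≤ (p:Int) := by push_cast; omega
        have c4 : (j:Int) ≤ (q:Int) := by push_cast; omega
        omega
      · right
        refine ⟨|(i:Int) - (p':Int)| + |(j:Int) - (q':Int)|, ?_, ?_⟩
        · exact List.mem_map.mpr ⟨(p', q'),
            (mem_bgList n m c _).mpr ⟨by omega, by omega, hc'⟩, rfl⟩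
        · have hIp : I p' q' = 0 := by rw [hI]; simp [hc']
          rw [hIp] at hv'
          rw [hv'] at hv
          have c1 : ((p':Nat):Int) ≤ (p:Int) := by push_cast; omega
          have c2 : ((q':Nat):Int) ≤ (q:Int) := by push_cast; omega
          have c3 : (i:Int) ≤ (p:Int) := by push_cast; omega
          have c4 : (j:Int) ≤ (q:Int) := by push_cast; omega
          have t1 : |(i:Int) - (p':Int)| ≤ ((p:Int) - (p':Int)) + ((p:Int) - (i:Int)) := by
            rcases le_total i p' with h | h
            · rw [abs_of_nonpos (by push_cast; omega)]; push_cast; omega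
            · rw [abs_of_nonneg (by push_cast; omega)]; push_cast; omega
          have t2 : |(j:Int) - (q':Int)| ≤ ((q:Int) - (q':Int)) + ((q:Int) - (j:Int)) := by
            rcases le_total j q' with h | h
            · rw [abs_of_nonpos (by push_cast; omega)]; push_cast; omega
            · rw [abs_of_nonneg (by push_cast; omega)]; push_cast; omega
          omega
  · rw [if_neg hc]
    have hIz : I i j = 0 := by rw [hI]; simp [hc]
    have h1 := bwd_le_self n m (fwdF I) i j
    have h2 := fwd_le_self I hInn i j
    have h3 := bwd_nonneg n m (fwdF I) hJnn ((n-i)+(m-j)) i j (le_refl _)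
    omega


-- assembly: both ports compute the grid of bwdF/the closed form, cell by cell
theorem dt_eq (binary : List (List Int)) :
    distance_transform binary = distance_transform_alt binary := by
  unfold distance_transform distance_transform_alt
  set n := binary.length with hn
  set m := (binary.headD []).length with hm
  set c : Nat → Nat → Int := fun a b => (binary.getD a []).getD b 0 with hc
  set I : Nat → Nat → Int := fun a b => if c a b = 1 then ((m:Int) + (n:Int)) else 0 with hI
  show (List.range n).reverse.foldl
      (fun g i => (List.range m).reverse.foldl (fun g j => dtBwdCell n m g i j) g)
      ((List.range n).foldl (fun g i => (List.range m).foldl (fun g j => dtFwdCell g i j) g)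
        (canon n m I))
    = canon n m (fun i j =>
        if c i j = 1 then
          ((List.range n).flatMap (fun k =>
            (List.range m).filterMap (fun l => if c k l ≠ 1 then some (k, l) else none))).foldl
            (fun best kl =>
              if |(i:Int) - (kl.1:Int)| + |(j:Int) - (kl.2:Int)| < best then
                |(i:Int) - (kl.1:Int)| + |(j:Int) - (kl.2:Int)| else best) ((m:Int) + (n:Int))
        else 0)
  rw [fwd_outer I n (le_refl n)]
  have h1 : canon n m (mixF I n 0) = canon n m (mixB n m (fwdF I) n 0) := by
    refine canon_congr ?_
    intro a ha b hb
    unfold mixF mixB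
    rw [if_pos (Or.inl ha), if_neg (by omega : ¬ (n < a ∨ (a = n ∧ 0 ≤ b)))]
  rw [h1, bwd_outer (fwdF I) n (le_refl n)]
  refine canon_congr ?_
  intro a ha b hb
  exact cell_eq n m c ha hb

-- ===== VERDICT (by name: the statement is the Claim_ definition above) =====
theorem distance_transform_spec : Claim_equal_distance_transform := by
  intro binary _ _
  unfold Spec_distance_transform
  exact dt_eq binary
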